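-- pv_equiv track=rewrite | github.com/ainekeith/smart-lab-resource | slab_app.py | filter_equipment
-- ===== SOURCE A (Python) =====
-- def filter_equipment(equipment_list, category=None, status=None, search_term=None):
--     """Filter equipment by category, status and search term"""
--     filtered = equipment_list
--
--     if category and category != "All":
--         filtered = [e for e in filtered if e["category"] == category]
--
--     if status and status != "All":
--         filtered = [e for e in filtered if e["status"] == status]
--
--     if search_term:
--         search_term = search_term.lower()
--         filtered = [e for e in filtered if search_term in e["name"].lower() or
--                    (e["description"] and search_term in e["description"].lower()) or
--                    (e["category"] and search_term in e["category"].lower()) or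
--                    (e["location"] and search_term in e["location"].lower())]
--
--     return filtered
-- ===== SOURCE B (Python) =====
-- def _matches(e, st):
--     if st in e["name"].lower():
--         return True
--     for key in ("description", "category", "location"):
--         v = e[key]
--         if v and st in v.lower():
--             return True
--     return False
--
--
-- def filter_equipment(equipment_list, category=None, status=None, search_term=None):
--     """Single-pass filter: one loop over equipment_list with per-item checks."""
--     cat = category if category and category != "All" else None
--     stat = status if status and status != "All" else None
--     st = search_term.lower() if search_term else None
--     result = []
--     for e in equipment_list:
--         if cat is not None and e["category"] != cat:
--             continue
--         if stat is not None and e["status"] != stat: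
--             continue
--         if st is not None and not _matches(e, st):
--             continue
--         result.append(e)
--     return result
-- ===== Notes on version B (the rewrite author's own statement) =====
-- stated objective: alternative
-- what changed: A builds up to three intermediate filtered lists in three sequential comprehension passes; B makes one explicit pass over equipment_list with per-item skip checks (search-term lowercased once, the three optional search fields checked by a small field loop) and appends survivors to a single result list.
import Mathlib
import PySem

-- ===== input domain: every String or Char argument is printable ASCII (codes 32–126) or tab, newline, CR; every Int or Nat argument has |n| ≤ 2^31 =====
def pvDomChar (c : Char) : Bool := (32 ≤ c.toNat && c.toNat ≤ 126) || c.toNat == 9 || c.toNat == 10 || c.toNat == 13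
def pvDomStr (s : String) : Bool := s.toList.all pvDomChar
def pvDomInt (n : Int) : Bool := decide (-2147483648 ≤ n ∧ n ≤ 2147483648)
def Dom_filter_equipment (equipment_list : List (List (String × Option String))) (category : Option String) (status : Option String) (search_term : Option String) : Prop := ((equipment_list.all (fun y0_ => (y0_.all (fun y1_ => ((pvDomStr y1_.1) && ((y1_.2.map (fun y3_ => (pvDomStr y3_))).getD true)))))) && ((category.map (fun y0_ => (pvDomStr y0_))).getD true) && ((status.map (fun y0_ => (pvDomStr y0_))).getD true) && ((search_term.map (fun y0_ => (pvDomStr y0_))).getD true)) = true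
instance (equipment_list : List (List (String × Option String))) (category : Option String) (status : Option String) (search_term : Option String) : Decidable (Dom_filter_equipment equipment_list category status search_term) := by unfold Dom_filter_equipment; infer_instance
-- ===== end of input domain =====

-- B replaces A's three sequential filtering passes by one explicit loop over the list with
-- per-item skip checks (alternative decomposition; return-value equivalence only — A may
-- return the input list object itself when no filter is active, B always builds a fresh list).

-- shared helper: first-match association-list lookup, e[k] (none = key absent = Python KeyError)
def dget (e : List (String × Option String)) (k : String) : Option (Option String) :=
  (e.find? (fun p => p.1 == k)).map Prod.snd

-- shared helper: Python "v and st in v.lower()" on an Optional[str] v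
def truthyMatch (st : String) (v : Option String) : Bool :=
  match v with
  | some x => x ≠ "" && PySem.Str.isIn st (PySem.Str.lower x)
  | none => false

-- ===== PORT A =====
-- the big or-chain in A's third comprehension (missing keys read as none; Pre_ rules those out)
def searchHitA (st : String) (e : List (String × Option String)) : Bool :=
  PySem.Str.isIn st (PySem.Str.lower (((dget e "name").getD none).getD ""))
  || truthyMatch st ((dget e "description").getD none)
  || truthyMatch st ((dget e "category").getD none)
  || truthyMatch st ((dget e "location").getD none)

def filter_equipment (equipment_list : List (List (String × Option String))) (category : Option String) (status : Option String) (search_term : Option String) : List (List (String × Option String)) :=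
  let filtered := equipment_list
  let filtered := match category with
    | some c => if c ≠ "" && c ≠ "All" then filtered.filter (fun e => (dget e "category").getD none == category) else filtered
    | none => filtered
  let filtered := match status with
    | some s => if s ≠ "" && s ≠ "All" then filtered.filter (fun e => (dget e "status").getD none == status) else filtered
    | none => filtered
  match search_term with
  | some s =>
      if s ≠ "" then
        let st := PySem.Str.lower s
        filtered.filter (fun e => searchHitA st e)
      else filtered
  | none => filtered

-- ===== PORT B =====
-- cat = category if category and category != "All" else None   (and likewise for status)
def activeParam (v : Option String) : Option String :=
  match v with
  | some c => if c ≠ "" && c ≠ "All" then some c else none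
  | none => none

-- st = search_term.lower() if search_term else None
def stParam (search_term : Option String) : Option String :=
  match search_term with
  | some s => if s ≠ "" then some (PySem.Str.lower s) else none
  | none => none

-- _matches(e, st): name first, then a loop over the three optional fields
def matchesB (e : List (String × Option String)) (st : String) : Bool :=
  if PySem.Str.isIn st (PySem.Str.lower (((dget e "name").getD none).getD "")) then true
  else ["description", "category", "location"].any (fun k => truthyMatch st ((dget e k).getD none))

def filter_equipment_alt (equipment_list : List (List (String × Option String))) (category : Option String) (status : Option String) (search_term : Option String) : List (List (String × Option String)) :=
  let cat := activeParam category
  let stat := activeParam status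
  let st := stParam search_term
  equipment_list.foldl (fun result e =>
    if (match cat with | some c => !((dget e "category").getD none == some c) | none => false) then result
    else if (match stat with | some s => !((dget e "status").getD none == some s) | none => false) then result
    else if (match st with | some t => !(matchesB e t) | none => false) then result
    else result ++ [e]) []

-- ===== PRECONDITION & SPEC =====
-- per-element "Python A raises no exception here": each dict key is read only along the
-- short-circuit path A actually takes (keys after an earlier matching disjunct are not needed)
def preOkSearch (st : String) (e : List (String × Option String)) : Bool :=
  match dget e "name" with
  | some (some nm) =>
      if PySem.Str.isIn st (PySem.Str.lower nm) then true
      else match dget e "description" with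
        | some d =>
            if truthyMatch st d then true
            else match dget e "category" with
              | some c => if truthyMatch st c then true else (dget e "location").isSome
              | none => false
        | none => false
  | _ => false

def preOk (category : Option String) (status : Option String) (search_term : Option String) (e : List (String × Option String)) : Bool :=
  let cat := activeParam category
  let stat := activeParam status
  (match cat with
   | some _ => (dget e "category").isSome
   | none => true) &&
  (match stat with
   | some _ =>
      -- status key is read only if e survives the category pass
      if (match cat with | some c => (dget e "category").getD none == some c | none => true)
      then (dget e "status").isSome
      else true
   | none => true) &&
  (match stParam search_term with
   | some st =>
      if (match cat with | some c => (dget e "category").getD none == some c | none => true)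
         && (match stat with | some s => (dget e "status").getD none == some s | none => true)
      then preOkSearch st e
      else true
   | none => true)

-- Pre_ holds exactly when Python A returns normally (no KeyError/AttributeError from a
-- missing key or a None "name" on an element that reaches the filter that reads it).
def Pre_filter_equipment (equipment_list : List (List (String × Option String))) (category : Option String) (status : Option String) (search_term : Option String) : Prop :=
  equipment_list.all (preOk category status search_term) = true

instance (equipment_list : List (List (String × Option String))) (category : Option String) (status : Option String) (search_term : Option String) : Decidable (Pre_filter_equipment equipment_list category status search_term) := by unfold Pre_filter_equipment; infer_instance

def pvWitness_filter_equipment : (List (List (String × Option String))) × Option String × Option String × Option String :=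
  ([[("category", some "Lab"), ("status", some "ok"), ("name", some "Pump"), ("description", none), ("location", some "A1")]],
   some "Lab", none, some "PU")

def Spec_filter_equipment (equipment_list : List (List (String × Option String))) (category : Option String) (status : Option String) (search_term : Option String) (out : List (List (String × Option String))) : Prop := out = filter_equipment_alt equipment_list category status search_term
instance (equipment_list : List (List (String × Option String))) (category : Option String) (status : Option String) (search_term : Option String) (out : List (List (String × Option String))) : Decidable (Spec_filter_equipment equipment_list category status search_term out) := by unfold Spec_filter_equipment; infer_instance

-- ===== CLAIM (what is proved, stated in full; the proofs are below) =====
def Claim_equal_filter_equipment : Prop := ∀ (equipment_list : List (List (String × Option String))) (category : Option String) (status : Option String) (search_term : Option String), Dom_filter_equipment equipment_list category status search_term → Pre_filter_equipment equipment_list category status search_term → Spec_filter_equipment equipment_list category status search_term (filter_equipment equipment_list category status search_term)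

-- ===== LEMMAS AND PROOFS =====

theorem filter_equipment_witness_ok :
    Dom_filter_equipment pvWitness_filter_equipment.1 pvWitness_filter_equipment.2.1 pvWitness_filter_equipment.2.2.1 pvWitness_filter_equipment.2.2.2 ∧
    Pre_filter_equipment pvWitness_filter_equipment.1 pvWitness_filter_equipment.2.1 pvWitness_filter_equipment.2.2.1 pvWitness_filter_equipment.2.2.2 := by
  constructor <;> decide

-- B's keep-tests, named for the proofs
def keepCat (category : Option String) (e : List (String × Option String)) : Bool :=
  match activeParam category with | some c => (dget e "category").getD none == some c | none => true
def keepStat (status : Option String) (e : List (String × Option String)) : Bool :=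
  match activeParam status with | some s => (dget e "status").getD none == some s | none => true
def keepSearch (search_term : Option String) (e : List (String × Option String)) : Bool :=
  match stParam search_term with | some t => matchesB e t | none => true

-- B's loop appends e exactly when all three keep-tests pass
theorem foldl_skip_eq_filter (P1 P2 P3 : List (String × Option String) → Bool)
    (l : List (List (String × Option String))) (acc : List (List (String × Option String))) :
    l.foldl (fun r e => if P1 e then r else if P2 e then r else if P3 e then r else r ++ [e]) acc
      = acc ++ l.filter (fun e => !P1 e && !P2 e && !P3 e) := by
  induction l generalizing acc with
  | nil => simp
  | cons x xs ih =>
      by_cases h1 : P1 x = true <;> by_cases h2 : P2 x = true <;> by_cases h3 : P3 x = true <;>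
        simp [h1, h2, h3, ih]

theorem alt_eq_filter (equipment_list : List (List (String × Option String))) (category : Option String) (status : Option String) (search_term : Option String) :
    filter_equipment_alt equipment_list category status search_term =
      equipment_list.filter (fun e => keepCat category e && keepStat status e && keepSearch search_term e) := by
  show List.foldl _ [] equipment_list = _
  rw [foldl_skip_eq_filter
      (fun e => match activeParam category with | some c => !((dget e "category").getD none == some c) | none => false)
      (fun e => match activeParam status with | some s => !((dget e "status").getD none == some s) | none => false)
      (fun e => match stParam search_term with | some t => !(matchesB e t) | none => false)]
  simp only [List.nil_append]
  apply List.filter_congr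
  intro e _
  unfold keepCat keepStat keepSearch
  rcases activeParam category with _ | c <;> rcases activeParam status with _ | s <;>
    rcases stParam search_term with _ | t <;> simp

-- A's three sequential passes, one at a time, as filters by the keep-tests
theorem stage_cat (l : List (List (String × Option String))) (category : Option String) :
    (match category with
     | some c => if c ≠ "" && c ≠ "All" then l.filter (fun e => (dget e "category").getD none == category) else l
     | none => l) = l.filter (keepCat category) := by
  rcases category with _ | c
  · exact (List.filter_eq_self.mpr (fun a _ => rfl)).symm
  · by_cases h : (c ≠ "" && c ≠ "All") = true
    · simp only [h]
      rw [if_pos (by simpa using h)]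
      refine List.filter_congr (fun e _ => ?_)
      unfold keepCat activeParam
      simp only [Option.some.injEq]
      rw [if_pos (by simpa using h)]
    · simp only []
      rw [if_neg (by simpa using h)]
      refine (List.filter_eq_self.mpr (fun a _ => ?_)).symm
      simp only [Bool.not_eq_true] at h
      unfold keepCat activeParam
      simp only [Option.some.injEq]
      rw [if_neg (by rw [h]; simp)]

theorem stage_stat (l : List (List (String × Option String))) (status : Option String) :
    (match status with
     | some s => if s ≠ "" && s ≠ "All" then l.filter (fun e => (dget e "status").getD none == status) else l
     | none => l) = l.filter (keepStat status) := by
  rcases status with _ | s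
  · exact (List.filter_eq_self.mpr (fun a _ => rfl)).symm
  · by_cases h : (s ≠ "" && s ≠ "All") = true
    · simp only [h]
      rw [if_pos (by simpa using h)]
      refine List.filter_congr (fun e _ => ?_)
      unfold keepStat activeParam
      simp only [Option.some.injEq]
      rw [if_pos (by simpa using h)]
    · simp only []
      rw [if_neg (by simpa using h)]
      refine (List.filter_eq_self.mpr (fun a _ => ?_)).symm
      simp only [Bool.not_eq_true] at h
      unfold keepStat activeParam
      simp only [Option.some.injEq]
      rw [if_neg (by rw [h]; simp)]

-- A's or-chain equals B's name-check-then-field-loop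
theorem searchHitA_eq_matchesB (st : String) (e : List (String × Option String)) :
    searchHitA st e = matchesB e st := by
  unfold searchHitA matchesB
  by_cases h : PySem.Str.isIn st (PySem.Str.lower (((dget e "name").getD none).getD "")) = true <;>
    simp [Bool.or_assoc]

theorem stage_search (l : List (List (String × Option String))) (search_term : Option String) :
    (match search_term with
     | some s => if s ≠ "" then l.filter (fun e => searchHitA (PySem.Str.lower s) e) else l
     | none => l) = l.filter (keepSearch search_term) := by
  rcases search_term with _ | s
  · exact (List.filter_eq_self.mpr (fun a _ => rfl)).symm
  · show (if s ≠ "" then List.filter (fun e => searchHitA (PySem.Str.lower s) e) l else l) = List.filter (keepSearch (some s)) l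
    by_cases h : s = ""
    · rw [if_neg (by simp [h])]
      refine (List.filter_eq_self.mpr (fun a _ => ?_)).symm
      unfold keepSearch stParam
      simp [h]
    · rw [if_pos h]
      refine List.filter_congr (fun e _ => ?_)
      show searchHitA (PySem.Str.lower s) e =
        (match (if s ≠ "" then some (PySem.Str.lower s) else none) with
         | some t => matchesB e t
         | none => true)
      rw [if_pos h]
      exact searchHitA_eq_matchesB _ _

theorem filter_equipment_eq_alt (equipment_list : List (List (String × Option String))) (category : Option String) (status : Option String) (search_term : Option String) :
    filter_equipment equipment_list category status search_term = filter_equipment_alt equipment_list category status search_term := by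
  rw [alt_eq_filter]
  show (match search_term with
     | some s => if s ≠ "" then List.filter (fun e => searchHitA (PySem.Str.lower s) e)
          ((match status with
            | some s => if s ≠ "" && s ≠ "All" then List.filter (fun e => (dget e "status").getD none == status)
                ((match category with
                  | some c => if c ≠ "" && c ≠ "All" then List.filter (fun e => (dget e "category").getD none == category) equipment_list else equipment_list
                  | none => equipment_list)) else
                (match category with
                  | some c => if c ≠ "" && c ≠ "All" then List.filter (fun e => (dget e "category").getD none == category) equipment_list else equipment_list
                  | none => equipment_list)
            | none =>
                (match category with
                  | some c => if c ≠ "" && c ≠ "All" then List.filter (fun e => (dget e "category").getD none == category) equipment_list else equipment_list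
                  | none => equipment_list)))
        else (match status with
            | some s => if s ≠ "" && s ≠ "All" then List.filter (fun e => (dget e "status").getD none == status)
                ((match category with
                  | some c => if c ≠ "" && c ≠ "All" then List.filter (fun e => (dget e "category").getD none == category) equipment_list else equipment_list
                  | none => equipment_list)) else
                (match category with
                  | some c => if c ≠ "" && c ≠ "All" then List.filter (fun e => (dget e "category").getD none == category) equipment_list else equipment_list
                  | none => equipment_list)
            | none =>
                (match category with
                  | some c => if c ≠ "" && c ≠ "All" then List.filter (fun e => (dget e "category").getD none == category) equipment_list else equipment_list
                  | none => equipment_list))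
     | none => (match status with
            | some s => if s ≠ "" && s ≠ "All" then List.filter (fun e => (dget e "status").getD none == status)
                ((match category with
                  | some c => if c ≠ "" && c ≠ "All" then List.filter (fun e => (dget e "category").getD none == category) equipment_list else equipment_list
                  | none => equipment_list)) else
                (match category with
                  | some c => if c ≠ "" && c ≠ "All" then List.filter (fun e => (dget e "category").getD none == category) equipment_list else equipment_list
                  | none => equipment_list)
            | none =>
                (match category with
                  | some c => if c ≠ "" && c ≠ "All" then List.filter (fun e => (dget e "category").getD none == category) equipment_list else equipment_list
                  | none => equipment_list))) = _
  rw [stage_cat equipment_list category, stage_stat _ status, stage_search _ search_term,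
      List.filter_filter, List.filter_filter]
  apply List.filter_congr
  intro e _
  cases keepCat category e <;> cases keepStat status e <;> cases keepSearch search_term e <;> simp

-- ===== VERDICT (by name: the statement is the Claim_ definition above) =====
theorem filter_equipment_spec : Claim_equal_filter_equipment := by
  intro l c s t _ _
  unfold Spec_filter_equipment
  exact filter_equipment_eq_alt l c s t
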